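-- pv_equiv track=rewrite | github.com/Uttutt17/AI-Phase-3--Cause-Effect-Pre-Decision | src/intents/intent_handler.py | _filter_available_attributes
-- ===== SOURCE A (Python) =====
-- from typing import List, Dict, Any
--
-- def _filter_available_attributes(
--
--     requested_attributes: List[str],
--     products_attributes: Dict[str, Dict[str, Any]]
-- ) -> List[str]:
--     """Filter attributes to only include those available in products."""
--     if not products_attributes:
--         return []
--
--     # Get intersection of all product attributes
--     all_product_attrs = set()
--     for product_attrs in products_attributes.values():
--         all_product_attrs.update(product_attrs.keys())
--
--     # Return requested attributes that exist in at least one product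
--     available = [attr for attr in requested_attributes if attr in all_product_attrs]
--     return available
-- ===== SOURCE B (Python) =====
-- from typing import List, Dict, Any
--
-- def _filter_available_attributes(
--     requested_attributes: List[str],
--     products_attributes: Dict[str, Dict[str, Any]]
-- ) -> List[str]:
--     """Keep requested attributes present in at least one product (direct scan, no precomputed set)."""
--     return [
--         attr for attr in requested_attributes
--         if any(attr in prod for prod in products_attributes.values())
--     ]
-- ===== Notes on version B (the rewrite author's own statement) =====
-- stated objective: simpler
-- what changed: Drops the precomputed union-set of all product keys and the empty-dict early return; each requested attribute is tested by scanning the products directly with any().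
import Mathlib
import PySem

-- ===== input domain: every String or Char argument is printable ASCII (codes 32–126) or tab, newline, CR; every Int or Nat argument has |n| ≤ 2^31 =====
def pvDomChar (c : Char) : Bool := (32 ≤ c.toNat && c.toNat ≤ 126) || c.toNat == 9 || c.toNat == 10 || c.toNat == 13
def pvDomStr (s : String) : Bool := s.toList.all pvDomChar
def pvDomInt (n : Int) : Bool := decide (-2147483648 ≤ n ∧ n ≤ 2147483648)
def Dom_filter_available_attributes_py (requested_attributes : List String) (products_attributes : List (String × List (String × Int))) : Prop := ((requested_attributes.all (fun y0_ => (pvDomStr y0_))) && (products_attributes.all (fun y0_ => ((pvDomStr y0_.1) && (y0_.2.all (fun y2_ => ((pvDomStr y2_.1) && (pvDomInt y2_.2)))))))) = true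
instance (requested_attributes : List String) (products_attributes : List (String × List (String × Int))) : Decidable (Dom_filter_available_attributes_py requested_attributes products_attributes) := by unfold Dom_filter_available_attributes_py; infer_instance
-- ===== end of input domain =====

-- ===== PORT A =====
-- Header: B drops A's precomputed union-set of product keys and the empty early return,
-- testing each requested attribute by a direct scan of the products; objective: simpler.
def filter_available_attributes_py (requested_attributes : List String) (products_attributes : List (String × List (String × Int))) : List String :=
  if products_attributes = [] then []
  else
    let all_product_attrs : PySem.Set String :=
      products_attributes.foldl (fun s p => PySem.Set.update s (p.2.map Prod.fst)) PySem.Set.empty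
    requested_attributes.filter (fun attr => PySem.Set.contains all_product_attrs attr)

-- ===== PORT B =====
def filter_available_attributes_py_alt (requested_attributes : List String) (products_attributes : List (String × List (String × Int))) : List String :=
  requested_attributes.filter (fun attr =>
    products_attributes.any (fun prod => prod.2.any (fun kv => kv.1 == attr)))

-- ===== PRECONDITION & SPEC =====
def Spec_filter_available_attributes_py (requested_attributes : List String) (products_attributes : List (String × List (String × Int))) (out : List String) : Prop := out = filter_available_attributes_py_alt requested_attributes products_attributes
instance (requested_attributes : List String) (products_attributes : List (String × List (String × Int))) (out : List String) : Decidable (Spec_filter_available_attributes_py requested_attributes products_attributes out) := by unfold Spec_filter_available_attributes_py; infer_instance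

-- ===== CLAIM (what is proved, stated in full; the proofs are below) =====
def Claim_equal_filter_available_attributes_py : Prop := ∀ (requested_attributes : List String) (products_attributes : List (String × List (String × Int))), Dom_filter_available_attributes_py requested_attributes products_attributes → Spec_filter_available_attributes_py requested_attributes products_attributes (filter_available_attributes_py requested_attributes products_attributes)

-- ===== LEMMAS AND PROOFS =====

-- ===== VERDICT (by name: the statement is the Claim_ definition above) =====
theorem contains_foldl_update (a : String) (prods : List (String × List (String × Int)))
    (s : PySem.Set String) :
    PySem.Set.contains (prods.foldl (fun s p => PySem.Set.update s (p.2.map Prod.fst)) s) a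
      = (PySem.Set.contains s a || prods.any (fun prod => prod.2.any (fun kv => kv.1 == a))) := by
  induction prods generalizing s with
  | nil => simp
  | cons p rest ih =>
      simp only [List.foldl_cons, List.any_cons, ih]
      apply Bool.eq_iff_iff.mpr
      simp only [Bool.or_eq_true, PySem.Set.contains, List.contains_iff_mem,
        PySem.Set.mem_update, List.mem_map, List.any_eq_true, beq_iff_eq]
      constructor
      · rintro ((h | ⟨kv, hkv, rfl⟩) | h)
        · exact Or.inl h
        · exact Or.inr (Or.inl ⟨kv, hkv, rfl⟩)
        · exact Or.inr (Or.inr h)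
      · rintro (h | ⟨kv, hkv, rfl⟩ | h)
        · exact Or.inl (Or.inl h)
        · exact Or.inl (Or.inr ⟨kv, hkv, rfl⟩)
        · exact Or.inr h

theorem filter_available_attributes_py_spec : Claim_equal_filter_available_attributes_py := by
  intro req prods _
  unfold Spec_filter_available_attributes_py
  unfold filter_available_attributes_py filter_available_attributes_py_alt
  split
  · next h => subst h; simp
  · simp only [contains_foldl_update]
    exact (List.filter_congr (fun a _ => by simp [PySem.Set.contains])).symm
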